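-- pv_equiv track=rewrite | github.com/ArseniyFaryna/DefenseInformLabs | app/services/lab1/lab1_service.py | period_until_seed
-- ===== SOURCE A (Python) =====
-- def period_until_seed(m: int, a: int, c: int, x0: int, max_steps: int = 5_000_000) -> int | None:
--     def f(x: int) -> int:
--         return (a * x + c) % m
--
--     x1 = f(x0)
--     x = x1
--     for k in range(1, max_steps + 1):
--         x = f(x)
--         if x == x1:
--             return k
--     return None
-- ===== SOURCE B (Python) =====
-- def period_until_seed(m: int, a: int, c: int, x0: int, max_steps: int = 5_000_000) -> int | None:
--     x1 = (a * x0 + c) % m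
--     seen = {x1}
--     x = x1
--     for k in range(1, max_steps + 1):
--         x = (a * x + c) % m
--         if x in seen:
--             return k if x == x1 else None
--         seen.add(x)
--     return None
-- ===== Notes on version B (the rewrite author's own statement) =====
-- stated objective: alternative
-- what changed: B replaces A's targeted 'x == x1' scan with visited-set cycle detection: it stops at the FIRST repeated iterate (returning k if the repeat is x1 and None if x1 is on a tail), instead of running all max_steps iterations in the None case.
import Mathlib
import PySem

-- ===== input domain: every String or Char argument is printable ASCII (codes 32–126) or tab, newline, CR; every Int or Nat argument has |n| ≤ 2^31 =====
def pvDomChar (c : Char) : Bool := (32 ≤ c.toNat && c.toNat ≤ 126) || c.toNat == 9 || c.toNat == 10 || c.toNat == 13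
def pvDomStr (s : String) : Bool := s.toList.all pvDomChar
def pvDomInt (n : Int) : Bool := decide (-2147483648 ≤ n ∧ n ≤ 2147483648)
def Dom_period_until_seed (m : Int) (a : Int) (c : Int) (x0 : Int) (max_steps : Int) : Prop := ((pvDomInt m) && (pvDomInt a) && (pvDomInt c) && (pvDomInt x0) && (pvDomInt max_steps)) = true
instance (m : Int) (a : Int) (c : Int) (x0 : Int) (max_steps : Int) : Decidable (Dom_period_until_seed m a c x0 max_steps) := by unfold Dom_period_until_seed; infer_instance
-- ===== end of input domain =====

-- ===== PORT A =====
-- B replaces A's targeted `x == x1` test with general visited-set cycle detection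
-- (stop at the first repeated iterate); same return value, proved equivalent for m ≠ 0.

-- inner `def f(x): return (a*x+c) % m` of A
def pvF (m a c x : Int) : Int := PySem.Int.mod (a * x + c) m

-- the `for k in range(1, max_steps+1)` loop of A, k carried as Int, fuel = number of remaining iterations
def pvALoop (m a c x1 x k : Int) : Nat → Option Int
  | 0 => none
  | Nat.succ fuel =>
    let x' := pvF m a c x
    if x' = x1 then some k else pvALoop m a c x1 x' (k + 1) fuel

def period_until_seed (m : Int) (a : Int) (c : Int) (x0 : Int) (max_steps : Int) : Option Int :=
  let x1 := pvF m a c x0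
  pvALoop m a c x1 x1 1 max_steps.toNat

-- ===== PORT B =====
-- B's loop: `seen` is a Python set of visited iterates; first repeat decides the answer
def pvBLoop (m a c x1 : Int) (seen : PySem.Set Int) (x k : Int) : Nat → Option Int
  | 0 => none
  | Nat.succ fuel =>
    let x' := PySem.Int.mod (a * x + c) m
    if x' ∈ seen then (if x' = x1 then some k else none)
    else pvBLoop m a c x1 (PySem.Set.add seen x') x' (k + 1) fuel

def period_until_seed_alt (m : Int) (a : Int) (c : Int) (x0 : Int) (max_steps : Int) : Option Int :=
  let x1 := PySem.Int.mod (a * x0 + c) m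
  pvBLoop m a c x1 (PySem.Set.ofList [x1]) x1 1 max_steps.toNat

-- ===== PRECONDITION & SPEC =====
-- Python's `%` raises ZeroDivisionError when m = 0 (both A and B raise there); nothing else is excluded.
def Pre_period_until_seed (m : Int) (a : Int) (c : Int) (x0 : Int) (max_steps : Int) : Prop := m ≠ 0
instance (m : Int) (a : Int) (c : Int) (x0 : Int) (max_steps : Int) : Decidable (Pre_period_until_seed m a c x0 max_steps) := by unfold Pre_period_until_seed; infer_instance
def pvWitness_period_until_seed : Int × Int × Int × Int × Int := (10, 3, 1, 5, 20)

def Spec_period_until_seed (m : Int) (a : Int) (c : Int) (x0 : Int) (max_steps : Int) (out : Option Int) : Prop := out = period_until_seed_alt m a c x0 max_steps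
instance (m : Int) (a : Int) (c : Int) (x0 : Int) (max_steps : Int) (out : Option Int) : Decidable (Spec_period_until_seed m a c x0 max_steps out) := by unfold Spec_period_until_seed; infer_instance

-- ===== CLAIM (what is proved, stated in full; the proofs are below) =====
def Claim_equal_period_until_seed : Prop := ∀ (m : Int) (a : Int) (c : Int) (x0 : Int) (max_steps : Int), Dom_period_until_seed m a c x0 max_steps → Pre_period_until_seed m a c x0 max_steps → Spec_period_until_seed m a c x0 max_steps (period_until_seed m a c x0 max_steps)

-- ===== LEMMAS AND PROOFS =====

-- the orbit of x1 under x ↦ (a*x+c) % m : pvIt … n is the value of the loop variable after n further steps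
def pvIt (m a c x1 : Int) : Nat → Int
  | 0 => x1
  | Nat.succ n => pvF m a c (pvIt m a c x1 n)

-- A's loop returns none when x1 never reappears among the remaining iterates
lemma pvALoop_none (m a c x1 : Int) : ∀ (fuel : Nat) (n : Nat) (k : Int),
    (∀ i : Nat, n < i → pvIt m a c x1 i ≠ x1) →
    pvALoop m a c x1 (pvIt m a c x1 n) k fuel = none := by
  intro fuel
  induction fuel with
  | zero => intro n k _; rfl
  | succ fuel ih =>
    intro n k h
    have hx : pvF m a c (pvIt m a c x1 n) = pvIt m a c x1 (n + 1) := rfl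
    simp only [pvALoop, hx, if_neg (h (n + 1) (Nat.lt_succ_self n))]
    exact ih (n + 1) (k + 1) (fun i hi => h i (Nat.lt_of_succ_lt hi))

-- once the orbit repeats (pvIt q = pvIt j, j < q), every later iterate equals one with index in [j, q)
lemma pvCycle (m a c x1 : Int) (j q : Nat) (hjq : j < q)
    (heq : pvIt m a c x1 q = pvIt m a c x1 j) :
    ∀ i : Nat, j ≤ i → ∃ t : Nat, j ≤ t ∧ t < q ∧ pvIt m a c x1 i = pvIt m a c x1 t := by
  intro i
  induction i with
  | zero => intro h0; exact ⟨0, h0, by omega, rfl⟩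
  | succ i ih =>
    intro hji
    rcases Nat.lt_or_ge i j with hlt | hge
    · -- then j = i+1
      have hj : j = i + 1 := Nat.le_antisymm hji hlt
      exact ⟨j, le_refl j, hjq, by rw [hj]⟩
    · rcases ih hge with ⟨t, hjt, htq, hit⟩
      rcases Nat.lt_or_ge (t + 1) q with h1 | h1
      · exact ⟨t + 1, Nat.le_succ_of_le hjt, h1, by
          show pvF m a c (pvIt m a c x1 i) = pvIt m a c x1 (t + 1)
          rw [hit]; rfl⟩
      · have htq1 : t + 1 = q := Nat.le_antisymm htq h1
        refine ⟨j, le_refl j, hjq, ?_⟩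
        show pvF m a c (pvIt m a c x1 i) = pvIt m a c x1 j
        rw [hit, ← heq, ← htq1]; rfl

-- main invariant: if seen = { pvIt 0, …, pvIt n } and x1 did not reappear among steps 1..n,
-- then A's loop and B's loop agree from state (x = pvIt n, k = n+1) on
lemma pvLoop_eq (m a c x1 : Int) : ∀ (fuel : Nat) (n : Nat) (seen : PySem.Set Int),
    (∀ y : Int, y ∈ seen ↔ ∃ j : Nat, j ≤ n ∧ y = pvIt m a c x1 j) →
    (∀ j : Nat, 1 ≤ j → j ≤ n → pvIt m a c x1 j ≠ x1) →
    pvALoop m a c x1 (pvIt m a c x1 n) ((n : Int) + 1) fuel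
      = pvBLoop m a c x1 seen (pvIt m a c x1 n) ((n : Int) + 1) fuel := by
  intro fuel
  induction fuel with
  | zero => intro n seen _ _; rfl
  | succ fuel ih =>
    intro n seen hseen hno
    have hx : PySem.Int.mod (a * pvIt m a c x1 n + c) m = pvIt m a c x1 (n + 1) := rfl
    simp only [pvALoop, pvBLoop, pvF, hx]
    by_cases hx1 : pvIt m a c x1 (n + 1) = x1
    · -- A returns some k; x1 = pvIt 0 ∈ seen, so B returns some k too
      have hmem : pvIt m a c x1 (n + 1) ∈ seen := by
        rw [hseen]; exact ⟨0, Nat.zero_le n, by rw [hx1]; rfl⟩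
      rw [if_pos hx1, if_pos hmem, if_pos hx1]
    · rw [if_neg hx1]
      by_cases hmem : pvIt m a c x1 (n + 1) ∈ seen
      · -- first repeat, not x1: B returns none; A runs out without ever seeing x1 again
        rw [if_pos hmem, if_neg hx1]
        rcases (hseen _).mp hmem with ⟨j, hjn, hj⟩
        have hj1 : 1 ≤ j := by
          rcases Nat.eq_zero_or_pos j with h0 | h1
          · exact absurd (by rw [hj, h0]; rfl) hx1
          · exact h1
        have hnever : ∀ i : Nat, n + 1 < i → pvIt m a c x1 i ≠ x1 := by
          intro i hi
          rcases pvCycle m a c x1 j (n + 1) (Nat.lt_succ_of_le hjn) hj i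
              (le_of_lt (Nat.lt_of_le_of_lt (Nat.le_trans hjn (Nat.le_succ n)) hi)) with
            ⟨t, hjt, htn, hit⟩
          rw [hit]
          exact hno t (Nat.le_trans hj1 hjt) (Nat.lt_succ_iff.mp htn)
        exact pvALoop_none m a c x1 fuel (n + 1) _ hnever
      · -- fresh iterate: both loops recurse
        rw [if_neg hmem]
        have h1 : ((n : Int) + 1) + 1 = ((n + 1 : Nat) : Int) + 1 := by push_cast; ring
        rw [h1]
        refine ih (n + 1) (PySem.Set.add seen (pvIt m a c x1 (n + 1))) ?_ ?_
        · intro y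
          rw [PySem.Set.mem_add, hseen]
          constructor
          · rintro (⟨j, hjn, hj⟩ | hy)
            · exact ⟨j, Nat.le_succ_of_le hjn, hj⟩
            · exact ⟨n + 1, le_refl _, hy⟩
          · rintro ⟨j, hjn, hj⟩
            rcases Nat.lt_or_ge j (n + 1) with hlt | hge
            · exact Or.inl ⟨j, Nat.lt_succ_iff.mp hlt, hj⟩
            · exact Or.inr (by rw [hj, Nat.le_antisymm hjn hge])
        · intro j hj1 hjn1
          rcases Nat.lt_or_ge j (n + 1) with hlt | hge
          · exact hno j hj1 (Nat.lt_succ_iff.mp hlt)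
          · rw [Nat.le_antisymm hjn1 hge]; exact hx1

-- ===== VERDICT (by name: the statement is the Claim_ definition above) =====
theorem period_until_seed_spec : Claim_equal_period_until_seed := by
  intro m a c x0 max_steps _ _
  unfold Spec_period_until_seed period_until_seed period_until_seed_alt
  have h0 : pvF m a c x0 = PySem.Int.mod (a * x0 + c) m := rfl
  rw [h0]
  have := pvLoop_eq m a c (PySem.Int.mod (a * x0 + c) m) max_steps.toNat 0
      (PySem.Set.ofList [PySem.Int.mod (a * x0 + c) m]) ?_ ?_
  · simpa using this
  · intro y
    rw [PySem.Set.mem_ofList]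
    constructor
    · intro hy; exact ⟨0, le_refl 0, by simpa using hy⟩
    · rintro ⟨j, hj, hy⟩
      simp [Nat.le_zero.mp hj] at hy
      simp [hy, pvIt]
  · intro j hj1 hj0
    omega
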